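-- pv_equiv track=rewrite | github.com/evdoxiataka/simulated_interventions_study_analysis | utils/information_retrieval.py | get_confidence
-- ===== SOURCE A (Python) =====
-- def get_confidence(participants, t_ids, data):
--     confidence = {}
--     for p in participants:
--         for t in t_ids:
--             if t not in confidence:
--                 confidence[t] = []
--             if t in data[p]['t_answers']:
--                 conf = int(data[p]['t_answers'][t]['confidence'][0])
--                 if conf == 1:
--                     confidence[t].append(-2)
--                 elif conf == 2:
--                     confidence[t].append(-1)
--                 elif conf == 3:
--                     confidence[t].append(0)
--                 elif conf == 4:
--                     confidence[t].append(1)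
--                 elif conf == 5:
--                     confidence[t].append(2)
--     return confidence
-- ===== SOURCE B (Python) =====
-- def get_confidence(participants, t_ids, data):
--     # Stage 1: flatten all recorded answers into one (task, raw confidence) event list.
--     events = [(t, int(data[p]['t_answers'][t]['confidence'][0]))
--               for p in participants for t in t_ids
--               if t in data[p]['t_answers']]
--     # Stage 2: group-by task, mapping each in-range confidence to its centred score.
--     return {t: [c - 3 for (u, c) in events if u == t and 1 <= c <= 5]
--             for t in t_ids}
-- ===== Notes on version B (the rewrite author's own statement) =====
-- stated objective: alternative
-- what changed: B replaces A's nested loops mutating a dict of lists by a two-stage pipeline: one pass flattens all recorded answers into a flat (task, confidence) event list, then a group-by pass builds each task's list by filtering that event list, with the five-branch if/elif table replaced by the closed form conf-3 guarded by 1<=conf<=5.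
-- intended difference: With an empty participants list but nonempty t_ids, A returns {} while B returns every task mapped to []; B's value is intended, since A itself initialises confidence[t]=[] for every task whenever any participant exists, and the missing keys are an artefact of the initialisation sitting inside the participant loop. — e.g. on get_confidence([], ["t"], []): A returns [], B returns [("t", [])]
import Mathlib
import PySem

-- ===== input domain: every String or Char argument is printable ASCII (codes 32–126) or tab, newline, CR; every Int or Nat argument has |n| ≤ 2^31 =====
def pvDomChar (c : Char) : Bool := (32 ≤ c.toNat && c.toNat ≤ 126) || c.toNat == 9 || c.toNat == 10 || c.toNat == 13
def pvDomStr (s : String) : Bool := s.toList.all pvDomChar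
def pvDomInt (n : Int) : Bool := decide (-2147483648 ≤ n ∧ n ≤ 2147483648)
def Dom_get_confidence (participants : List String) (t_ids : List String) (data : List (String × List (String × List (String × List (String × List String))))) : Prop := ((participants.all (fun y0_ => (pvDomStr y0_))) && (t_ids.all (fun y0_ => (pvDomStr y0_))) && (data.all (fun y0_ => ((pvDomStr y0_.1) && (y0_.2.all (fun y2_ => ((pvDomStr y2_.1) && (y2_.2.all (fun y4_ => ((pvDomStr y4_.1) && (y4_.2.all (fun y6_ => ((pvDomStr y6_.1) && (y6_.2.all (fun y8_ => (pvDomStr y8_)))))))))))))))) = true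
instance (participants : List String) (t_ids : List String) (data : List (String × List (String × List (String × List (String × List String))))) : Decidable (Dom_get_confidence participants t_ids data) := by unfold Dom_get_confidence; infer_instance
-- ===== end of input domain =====

-- B replaces A's nested-loop dict mutation by a two-stage pipeline (flat (task, confidence) event
-- list, then a group-by pass per task with the closed-form score c-3); objective: alternative.


-- shared subexpressions of both Pythons: data[p]['t_answers'] and int(...['confidence'][0])
def pvAnswers (data : List (String × List (String × List (String × List (String × List String))))) (p : String) : PySem.Dict String (List (String × List String)) :=
  PySem.Dict.mk ((PySem.Dict.mk ((PySem.Dict.mk data).getD p [])).getD "t_answers" [])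
def pvC (data : List (String × List (String × List (String × List (String × List String))))) (p t : String) : Int :=
  (PySem.Int.ofStr? (PySem.List.pyGetD ((PySem.Dict.mk ((pvAnswers data p).getD t [])).getD "confidence" []) 0 "")).getD 0

-- ===== PORT A =====
def get_confidence (participants : List String) (t_ids : List String) (data : List (String × List (String × List (String × List (String × List String))))) : List (String × List Int) :=
  (participants.foldl (fun confidence p =>
    t_ids.foldl (fun confidence t =>
      let confidence := if confidence.contains t then confidence else confidence.insert t ([] : List Int)
      if (pvAnswers data p).contains t then
        let conf := pvC data p t
        if conf = 1 then confidence.modify t [] (· ++ [(-2 : Int)])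
        else if conf = 2 then confidence.modify t [] (· ++ [(-1 : Int)])
        else if conf = 3 then confidence.modify t [] (· ++ [(0 : Int)])
        else if conf = 4 then confidence.modify t [] (· ++ [(1 : Int)])
        else if conf = 5 then confidence.modify t [] (· ++ [(2 : Int)])
        else confidence
      else confidence) confidence) (PySem.Dict.empty : PySem.Dict String (List Int))).items

-- ===== PORT B =====
def get_confidence_alt (participants : List String) (t_ids : List String) (data : List (String × List (String × List (String × List (String × List String))))) : List (String × List Int) :=
  let events : List (String × Int) :=
    participants.foldl (fun events p =>
      t_ids.foldl (fun events t =>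
        if (pvAnswers data p).contains t then events ++ [(t, pvC data p t)]
        else events) events) []
  (t_ids.foldl (fun result t =>
    result.insert t ((events.filter (fun e => e.1 == t && decide (1 ≤ e.2) && decide (e.2 ≤ 5))).map (fun e => e.2 - 3)))
    (PySem.Dict.empty : PySem.Dict String (List Int))).items

-- ===== PRECONDITION & SPEC =====
-- Pre_ excludes exactly the inputs on which A raises: whenever the inner loop body runs
-- (t_ids nonempty), every participant must be a key of data with a 't_answers' dict, and every
-- answered task must carry a nonempty 'confidence' list whose first element parses as an int.
def Pre_get_confidence (participants : List String) (t_ids : List String) (data : List (String × List (String × List (String × List (String × List String))))) : Prop :=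
  t_ids ≠ [] →
    ∀ p ∈ participants,
      (PySem.Dict.mk data).contains p = true ∧
      (PySem.Dict.mk ((PySem.Dict.mk data).getD p [])).contains "t_answers" = true ∧
      ∀ t ∈ t_ids,
        (pvAnswers data p).contains t = true →
          (PySem.Dict.mk ((pvAnswers data p).getD t [])).contains "confidence" = true ∧
          (PySem.Dict.mk ((pvAnswers data p).getD t [])).getD "confidence" [] ≠ [] ∧
          (PySem.Int.ofStr? (((PySem.Dict.mk ((pvAnswers data p).getD t [])).getD "confidence" []).headD "")).isSome
instance (participants : List String) (t_ids : List String) (data : List (String × List (String × List (String × List (String × List String))))) : Decidable (Pre_get_confidence participants t_ids data) := by unfold Pre_get_confidence; infer_instance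

def pvWitness_get_confidence : List String × List String × (List (String × List (String × List (String × List (String × List String))))) :=
  (["p"], ["t"], [("p", [("t_answers", [("t", [("confidence", ["5"])])])])])

-- With no participants but nonempty t_ids, A returns the empty dict while B returns every task
-- mapped to []; B's value is the intended one, since A's own code initialises confidence[t]=[] for
-- every task whenever at least one participant exists, and the missing keys are an artefact of the
-- initialisation sitting inside the participant loop.
def D_get_confidence (participants : List String) (t_ids : List String) (data : List (String × List (String × List (String × List (String × List String))))) : Prop :=
  participants = [] ∧ t_ids ≠ []
instance (participants : List String) (t_ids : List String) (data : List (String × List (String × List (String × List (String × List String))))) : Decidable (D_get_confidence participants t_ids data) := by unfold D_get_confidence; infer_instance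

def Spec_get_confidence (participants : List String) (t_ids : List String) (data : List (String × List (String × List (String × List (String × List String))))) (out : List (String × List Int)) : Prop := ¬ D_get_confidence participants t_ids data → out = get_confidence_alt participants t_ids data
instance (participants : List String) (t_ids : List String) (data : List (String × List (String × List (String × List (String × List String))))) (out : List (String × List Int)) : Decidable (Spec_get_confidence participants t_ids data out) := by unfold Spec_get_confidence; infer_instance

def pvDiffWitness_get_confidence : List String × List String × (List (String × List (String × List (String × List (String × List String))))) :=
  ([], ["t"], [])
def pvDiffWitnessOut_get_confidence : (List (String × List Int)) × (List (String × List Int)) :=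
  ([], [("t", [])])

-- ===== CLAIM (what is proved, stated in full; the proofs are below) =====
def Claim_unchanged_get_confidence : Prop := ∀ (participants : List String) (t_ids : List String) (data : List (String × List (String × List (String × List (String × List String))))), Dom_get_confidence participants t_ids data → Pre_get_confidence participants t_ids data → Spec_get_confidence participants t_ids data (get_confidence participants t_ids data)
def Claim_changed_get_confidence : Prop := Dom_get_confidence (pvDiffWitness_get_confidence.1) (pvDiffWitness_get_confidence.2.1) (pvDiffWitness_get_confidence.2.2) ∧ Pre_get_confidence (pvDiffWitness_get_confidence.1) (pvDiffWitness_get_confidence.2.1) (pvDiffWitness_get_confidence.2.2) ∧ D_get_confidence (pvDiffWitness_get_confidence.1) (pvDiffWitness_get_confidence.2.1) (pvDiffWitness_get_confidence.2.2) ∧ get_confidence (pvDiffWitness_get_confidence.1) (pvDiffWitness_get_confidence.2.1) (pvDiffWitness_get_confidence.2.2) = pvDiffWitnessOut_get_confidence.1 ∧ get_confidence_alt (pvDiffWitness_get_confidence.1) (pvDiffWitness_get_confidence.2.1) (pvDiffWitness_get_confidence.2.2) = pvDiffWitnessOut_get_confidence.2 ∧ pvDiffWitnessOut_get_confidence.1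 ≠ pvDiffWitnessOut_get_confidence.2
def Claim_exact_get_confidence : Prop := ∀ (participants : List String) (t_ids : List String) (data : List (String × List (String × List (String × List (String × List String))))), Dom_get_confidence participants t_ids data → Pre_get_confidence participants t_ids data → D_get_confidence participants t_ids data → get_confidence participants t_ids data ≠ get_confidence_alt participants t_ids data

-- ===== LEMMAS AND PROOFS =====

-- per-(participant, task) mapped contribution, shared vocabulary of the proofs
def pvDelta (data : List (String × List (String × List (String × List (String × List String))))) (p t : String) : List Int :=
  if (pvAnswers data p).contains t ∧ 1 ≤ pvC data p t ∧ pvC data p t ≤ 5 then [pvC data p t - 3] else []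

-- the insertion-order key accumulator both dicts build
def pvDStep (ks : List String) (t : String) : List String := if t ∈ ks then ks else ks ++ [t]

-- A's inner-loop body, named for the proofs (definitionally the lambda inside get_confidence)
def pvStepA (data : List (String × List (String × List (String × List (String × List String))))) (p : String) (confidence : PySem.Dict String (List Int)) (t : String) : PySem.Dict String (List Int) :=
  let confidence := if confidence.contains t then confidence else confidence.insert t ([] : List Int)
  if (pvAnswers data p).contains t then
    let conf := pvC data p t
    if conf = 1 then confidence.modify t [] (· ++ [(-2 : Int)])
    else if conf = 2 then confidence.modify t [] (· ++ [(-1 : Int)])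
    else if conf = 3 then confidence.modify t [] (· ++ [(0 : Int)])
    else if conf = 4 then confidence.modify t [] (· ++ [(1 : Int)])
    else if conf = 5 then confidence.modify t [] (· ++ [(2 : Int)])
    else confidence
  else confidence

theorem pvA_eq (participants t_ids : List String) (data : List (String × List (String × List (String × List (String × List String))))) :
    get_confidence participants t_ids data =
      (participants.foldl (fun d p => t_ids.foldl (pvStepA data p) d) (PySem.Dict.empty : PySem.Dict String (List Int))).items := rfl

theorem pvGetD_stepA (data : List (String × List (String × List (String × List (String × List String))))) (p : String) (d : PySem.Dict String (List Int)) (t k : String) :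
    (pvStepA data p d t).getD k [] = d.getD k [] ++ (if k = t then pvDelta data p t else []) := by
  unfold pvStepA pvDelta
  cases hd : d.contains t with
  | false =>
    cases hh : (pvAnswers data p).contains t <;>
      simp only [hh, if_true, if_false, Bool.false_eq_true] <;>
      split_ifs <;>
      simp_all [PySem.Dict.getD_insert, PySem.Dict.getD_modify, PySem.Dict.getD_of_not_contains d ([] : List Int) hd] <;>
      omega
  | true =>
    cases hh : (pvAnswers data p).contains t <;>
      simp only [hh, if_true, if_false, Bool.false_eq_true] <;>
      split_ifs <;>
      simp_all [PySem.Dict.getD_modify] <;>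
      omega

theorem pvKeys_insert (d : PySem.Dict String (List Int)) (k : String) (v : List Int) :
    (d.insert k v).keys = pvDStep d.keys k := by
  unfold pvDStep
  by_cases h : k ∈ d.keys
  · rw [if_pos h, PySem.Dict.keys_insert_of_contains d v (by rw [PySem.Dict.contains_eq_decide_mem_keys]; simp [h])]
  · rw [if_neg h, PySem.Dict.keys_insert_of_not_contains d v (by rw [PySem.Dict.contains_eq_decide_mem_keys]; simp [h])]

theorem pvKeys_stepA (data : List (String × List (String × List (String × List (String × List String))))) (p : String) (d : PySem.Dict String (List Int)) (t : String) :
    (pvStepA data p d t).keys = pvDStep d.keys t := by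
  simp only [pvStepA]
  generalize hG : (if d.contains t = true then d else d.insert t ([] : List Int)) = d1
  have hk1 : d1.keys = pvDStep d.keys t := by
    rw [← hG, PySem.Dict.contains_eq_decide_mem_keys]
    unfold pvDStep
    by_cases h : t ∈ d.keys
    · simp [h]
    · simp [h, pvKeys_insert, pvDStep]
  have hmem : t ∈ d1.keys := by
    rw [hk1]; unfold pvDStep; by_cases h : t ∈ d.keys <;> simp [h]
  rw [← hk1]
  split_ifs <;> first
    | rfl
    | rw [PySem.Dict.keys_modify, pvKeys_insert, pvDStep, if_pos hmem]

-- properties of the key accumulator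
theorem pvDFold_mem_iff (ts : List String) (ks : List String) (x : String) :
    x ∈ ts.foldl pvDStep ks ↔ x ∈ ks ∨ x ∈ ts := by
  induction ts generalizing ks with
  | nil => simp
  | cons t rest ih =>
    rw [List.foldl_cons, ih]
    unfold pvDStep
    split_ifs with h
    · constructor
      · tauto
      · simp only [List.mem_cons]
        rintro (h' | rfl | h') <;> tauto
    · simp only [List.mem_append, List.mem_singleton, List.mem_cons]
      tauto

theorem pvDFold_mem (ts : List String) (ks : List String) (x : String) (h : x ∈ ts) :
    x ∈ ts.foldl pvDStep ks := (pvDFold_mem_iff ts ks x).mpr (Or.inr h)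

theorem pvDFold_fixed (ts : List String) (ks : List String) (h : ∀ t ∈ ts, t ∈ ks) :
    ts.foldl pvDStep ks = ks := by
  induction ts with
  | nil => rfl
  | cons t rest ih =>
    rw [List.foldl_cons]
    rw [show pvDStep ks t = ks from by unfold pvDStep; rw [if_pos (h t (List.mem_cons_self ..))]]
    exact ih (fun x hx => h x (List.mem_cons_of_mem _ hx))

theorem pvDFold_nodup (ts : List String) (ks : List String) (h : ks.Nodup) :
    (ts.foldl pvDStep ks).Nodup := by
  induction ts generalizing ks with
  | nil => exact h
  | cons t rest ih =>
    rw [List.foldl_cons]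
    apply ih
    unfold pvDStep
    split_ifs with ht
    · exact h
    · exact List.Nodup.append h (List.nodup_singleton t)
        (fun a ha hb => ht ((List.mem_singleton.mp hb) ▸ ha))

-- A's fold, characterised
theorem pvGetD_inner (data : List (String × List (String × List (String × List (String × List String))))) (p : String) (ts : List String) :
    ∀ (d : PySem.Dict String (List Int)) (k : String),
      (ts.foldl (pvStepA data p) d).getD k [] = d.getD k [] ++ ts.flatMap (fun t => if k = t then pvDelta data p t else []) := by
  induction ts with
  | nil => intro d k; simp
  | cons t rest ih =>
    intro d k
    rw [List.foldl_cons, ih, pvGetD_stepA]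
    simp [List.flatMap_cons]

theorem pvKeys_inner (data : List (String × List (String × List (String × List (String × List String))))) (p : String) (ts : List String) :
    ∀ (d : PySem.Dict String (List Int)), (ts.foldl (pvStepA data p) d).keys = ts.foldl pvDStep d.keys := by
  induction ts with
  | nil => intro d; rfl
  | cons t rest ih =>
    intro d
    rw [List.foldl_cons, ih, List.foldl_cons, pvKeys_stepA]

theorem pvGetD_outer (data : List (String × List (String × List (String × List (String × List String))))) (ts : List String) (ps : List String) :
    ∀ (d : PySem.Dict String (List Int)) (k : String),
      (ps.foldl (fun d p => ts.foldl (pvStepA data p) d) d).getD k [] =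
        d.getD k [] ++ ps.flatMap (fun p => ts.flatMap (fun t => if k = t then pvDelta data p t else [])) := by
  induction ps with
  | nil => intro d k; simp
  | cons p rest ih =>
    intro d k
    rw [List.foldl_cons, ih, pvGetD_inner]
    simp [List.flatMap_cons]

theorem pvKeys_outer_keep (data : List (String × List (String × List (String × List (String × List String))))) (ts : List String) (ps : List String) :
    ∀ (d : PySem.Dict String (List Int)), (∀ t ∈ ts, t ∈ d.keys) →
      (ps.foldl (fun d p => ts.foldl (pvStepA data p) d) d).keys = d.keys := by
  induction ps with
  | nil => intro d _; rfl
  | cons p rest ih =>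
    intro d hmem
    rw [List.foldl_cons]
    have hk : (ts.foldl (pvStepA data p) d).keys = d.keys := by
      rw [pvKeys_inner]; exact pvDFold_fixed ts d.keys hmem
    rw [ih _ (by rw [hk]; exact hmem), hk]

theorem pvKeys_outer (data : List (String × List (String × List (String × List (String × List String))))) (ts : List String) (ps : List String) (hps : ps ≠ []) :
    (ps.foldl (fun d p => ts.foldl (pvStepA data p) d) (PySem.Dict.empty : PySem.Dict String (List Int))).keys = ts.foldl pvDStep [] := by
  cases ps with
  | nil => exact absurd rfl hps
  | cons p rest =>
    rw [List.foldl_cons]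
    have h1 : (ts.foldl (pvStepA data p) (PySem.Dict.empty : PySem.Dict String (List Int))).keys = ts.foldl pvDStep [] := by
      rw [pvKeys_inner]; simp [PySem.Dict.keys_empty]
    rw [pvKeys_outer_keep data ts rest _ (by
      rw [h1]; exact fun t ht => pvDFold_mem ts [] t ht), h1]

-- B's fold, characterised
theorem pvEvents_inner (data : List (String × List (String × List (String × List (String × List String))))) (p : String) (ts : List String) :
    ∀ (acc : List (String × Int)),
      (ts.foldl (fun events t =>
        if (pvAnswers data p).contains t then events ++ [(t, pvC data p t)]
        else events) acc) =
      acc ++ ts.flatMap (fun t => if (pvAnswers data p).contains t then [(t, pvC data p t)] else []) := by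
  induction ts with
  | nil => intro acc; simp
  | cons t rest ih =>
    intro acc
    rw [List.foldl_cons, List.flatMap_cons]
    by_cases h : (pvAnswers data p).contains t = true
    · rw [if_pos h, ih, if_pos h, List.append_assoc]
    · rw [if_neg h, ih, if_neg h, List.nil_append]

theorem pvEvents_eq (data : List (String × List (String × List (String × List (String × List String))))) (ps ts : List String) :
    (ps.foldl (fun events p =>
      ts.foldl (fun events t =>
        if (pvAnswers data p).contains t then events ++ [(t, pvC data p t)]
        else events) events) ([] : List (String × Int))) =
    ps.flatMap (fun p => ts.flatMap (fun t => if (pvAnswers data p).contains t then [(t, pvC data p t)] else [])) := by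
  suffices h : ∀ acc : List (String × Int),
      (ps.foldl (fun events p =>
        ts.foldl (fun events t =>
          if (pvAnswers data p).contains t then events ++ [(t, pvC data p t)]
          else events) events) acc) =
      acc ++ ps.flatMap (fun p => ts.flatMap (fun t => if (pvAnswers data p).contains t then [(t, pvC data p t)] else [])) by
    simpa using h []
  induction ps with
  | nil => intro acc; simp
  | cons p rest ih =>
    intro acc
    rw [List.foldl_cons, pvEvents_inner, ih]
    simp [List.flatMap_cons]

-- the group-by pass recovers the per-task mapped contributions
theorem pvGroup_one (data : List (String × List (String × List (String × List (String × List String))))) (p k : String) (ts : List String) :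
    ((ts.flatMap (fun t => if (pvAnswers data p).contains t then [(t, pvC data p t)] else [])).filter
        (fun e => e.1 == k && decide (1 ≤ e.2) && decide (e.2 ≤ 5))).map (fun e => e.2 - 3) =
      ts.flatMap (fun t => if k = t then pvDelta data p t else []) := by
  induction ts with
  | nil => rfl
  | cons t rest ih =>
    rw [List.flatMap_cons, List.flatMap_cons, List.filter_append, List.map_append, ih]
    congr 1
    by_cases hh : (pvAnswers data p).contains t = true
    · by_cases hk : k = t
      · subst hk
        by_cases hr : 1 ≤ pvC data p k ∧ pvC data p k ≤ 5
        · simp [hh, pvDelta, List.filter, hr.1, hr.2]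
        · rcases not_and_or.mp hr with hr | hr <;>
            simp [hh, pvDelta, List.filter, hr]
      · have hbk : (t == k) = false := beq_eq_false_iff_ne.mpr (Ne.symm hk)
        simp [hh, pvDelta, List.filter, hbk, hk]
    · simp [hh, pvDelta]

theorem pvGroup_eq (data : List (String × List (String × List (String × List (String × List String))))) (ps ts : List String) (k : String) :
    ((ps.flatMap (fun p => ts.flatMap (fun t => if (pvAnswers data p).contains t then [(t, pvC data p t)] else []))).filter
        (fun e => e.1 == k && decide (1 ≤ e.2) && decide (e.2 ≤ 5))).map (fun e => e.2 - 3) =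
      ps.flatMap (fun p => ts.flatMap (fun t => if k = t then pvDelta data p t else [])) := by
  induction ps with
  | nil => rfl
  | cons p rest ih =>
    rw [List.flatMap_cons, List.filter_append, List.map_append, ih, List.flatMap_cons, pvGroup_one]

-- a fold of (re-)inserts keyed by a fixed function of the key
theorem pvGetD_foldl_insert (ts : List String) (f : String → List Int) :
    ∀ (d : PySem.Dict String (List Int)) (k : String),
      (ts.foldl (fun d t => d.insert t (f t)) d).getD k [] = if k ∈ ts then f k else d.getD k [] := by
  induction ts with
  | nil => intro d k; simp
  | cons t rest ih =>
    intro d k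
    rw [List.foldl_cons, ih]
    by_cases hr : k ∈ rest
    · simp [hr]
    · by_cases hk : k = t <;> simp [hr, hk, PySem.Dict.getD_insert]

theorem pvKeys_foldl_insert (ts : List String) (f : String → List Int) :
    ∀ (d : PySem.Dict String (List Int)),
      (ts.foldl (fun d t => d.insert t (f t)) d).keys = ts.foldl pvDStep d.keys := by
  induction ts with
  | nil => intro d; rfl
  | cons t rest ih =>
    intro d
    rw [List.foldl_cons, List.foldl_cons, ih, pvKeys_insert]

-- both sides as the same canonical association list
theorem pvB_canon (participants t_ids : List String) (data : List (String × List (String × List (String × List (String × List String))))) :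
    get_confidence_alt participants t_ids data =
      (t_ids.foldl pvDStep []).map (fun k =>
        (k, participants.flatMap (fun p => t_ids.flatMap (fun t => if k = t then pvDelta data p t else [])))) := by
  unfold get_confidence_alt
  rw [pvEvents_eq]
  rw [PySem.Dict.items_eq_map_keys _
      (by rw [pvKeys_foldl_insert]; exact pvDFold_nodup t_ids _ (by simp [PySem.Dict.keys_empty])) []]
  rw [pvKeys_foldl_insert]
  simp only [PySem.Dict.keys_empty]
  apply List.map_congr_left
  intro k hk
  rw [pvGetD_foldl_insert]
  rw [if_pos (by simpa using (pvDFold_mem_iff t_ids [] k).mp hk)]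
  rw [pvGroup_eq]

theorem pvA_canon (participants t_ids : List String) (data : List (String × List (String × List (String × List (String × List String))))) (hps : participants ≠ []) :
    get_confidence participants t_ids data =
      (t_ids.foldl pvDStep []).map (fun k =>
        (k, participants.flatMap (fun p => t_ids.flatMap (fun t => if k = t then pvDelta data p t else [])))) := by
  rw [pvA_eq]
  rw [PySem.Dict.items_eq_map_keys _
      (by rw [pvKeys_outer data t_ids participants hps]; exact pvDFold_nodup t_ids _ (by simp)) []]
  rw [pvKeys_outer data t_ids participants hps]
  apply List.map_congr_left
  intro k _
  rw [pvGetD_outer]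
  simp [PySem.Dict.getD_empty]

-- ===== VERDICT (by name: the statement is the Claim_ definition above) =====
theorem get_confidence_spec : Claim_unchanged_get_confidence := by
  intro participants t_ids data _ _ hnd
  by_cases hts : t_ids = []
  · subst hts
    rw [pvB_canon]
    cases participants with
    | nil => rfl
    | cons p rest =>
      rw [pvA_canon _ _ _ (by simp)]
  · have hps : participants ≠ [] := by
      unfold D_get_confidence at hnd
      intro h; exact hnd ⟨h, hts⟩
    rw [pvA_canon _ _ _ hps, pvB_canon]

theorem get_confidence_changed : Claim_changed_get_confidence := by
  unfold Claim_changed_get_confidence; decide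

theorem get_confidence_tight : Claim_exact_get_confidence := by
  intro participants t_ids data _ _ hd
  obtain ⟨hps, hts⟩ : participants = [] ∧ t_ids ≠ [] := hd
  subst hps
  rw [pvB_canon]
  intro h
  have hA : get_confidence [] t_ids data = [] := rfl
  rw [hA] at h
  cases t_ids with
  | nil => exact hts rfl
  | cons t rest =>
    have hm : t ∈ (t :: rest).foldl pvDStep [] := pvDFold_mem _ [] t (List.mem_cons_self ..)
    rcases hmap : ((t :: rest).foldl pvDStep []) with _ | ⟨a, l⟩
    · rw [hmap] at hm; cases hm
    · rw [hmap] at h; simp at h
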